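-- pv_equiv track=rewrite | github.com/iansedano/aoc | python/src/aoc/y_2025/d_06/solution.py | part_1
-- ===== SOURCE A (Python) =====
-- from math import prod
--
-- def part_1(parsed_input):
--     parsed_input = [
--         [int(x) if x not in "+*" else x for x in line.split()]
--         for line in parsed_input.splitlines()
--     ]
--
--     length = len(parsed_input[0])
--
--     problems = [
--         [parsed_input[y][x] for y in range(len(parsed_input))]
--         for x in range(length)
--     ]
--     problems = [(p[-1], p[:-1]) for p in problems]
--
--     return solve_problems(problems)
--
-- def solve_problems(problems):
--     total = 0
--
--     for op, nums in problems:
--         if op == "+":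
--             total += sum(nums)
--         elif op == "*":
--             total += prod(nums)
--     return total
-- ===== SOURCE B (Python) =====
-- def part_1(parsed_input):
--     rows = [
--         [int(x) if x not in "+*" else x for x in line.split()]
--         for line in parsed_input.splitlines()
--     ]
--     ops = rows[-1]
--     # one accumulator per column of the first row: 0 for '+', 1 for '*', None = inactive
--     acc = [0 if op == "+" else 1 if op == "*" else None
--            for op in ops[:len(rows[0])]]
--     # single row-major streaming pass over the number rows
--     for row in rows[:-1]:
--         acc = [a if a is None
--                else a + row[x] if ops[x] == "+"
--                else a * row[x]
--                for x, a in enumerate(acc)]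
--     return sum(a for a in acc if a is not None)
-- ===== Notes on version B (the rewrite author's own statement) =====
-- stated objective: alternative
-- what changed: A transposes the grid into per-column lists and then sums or multiplies each column; B never transposes: it reads the last line as the operator row, keeps one accumulator per column (0 for '+', 1 for '*', None otherwise) and folds the number rows in a single row-major streaming pass, updating every column accumulator per row, then sums the active accumulators.
import Mathlib
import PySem

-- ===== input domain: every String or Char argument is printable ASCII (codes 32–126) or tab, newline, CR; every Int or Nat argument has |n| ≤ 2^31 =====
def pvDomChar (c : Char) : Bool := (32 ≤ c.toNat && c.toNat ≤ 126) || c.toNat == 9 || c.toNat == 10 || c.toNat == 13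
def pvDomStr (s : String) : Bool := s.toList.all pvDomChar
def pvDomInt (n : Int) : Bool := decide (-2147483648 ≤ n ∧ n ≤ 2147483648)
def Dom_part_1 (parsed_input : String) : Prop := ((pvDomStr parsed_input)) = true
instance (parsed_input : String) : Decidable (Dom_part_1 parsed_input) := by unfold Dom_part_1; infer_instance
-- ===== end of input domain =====

-- B replaces A's transpose-then-per-column sum/prod with a single row-major streaming pass
-- over per-column accumulators (objective: alternative decomposition; return value only).

-- ===== PORT A =====

-- a cell of the parsed grid: an int or a kept operator string
inductive Tok
  | i : Int → Tok
  | s : String → Tok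
deriving DecidableEq, Repr

-- 'int(x) if x not in "+*" else x'; the .getD 0 is dead under Pre_ (ValueError excluded there)
def parseTok (x : String) : Tok :=
  if PySem.Str.isIn x "+*" then Tok.s x else Tok.i ((PySem.Int.ofStr? x).getD 0)

-- value of a cell used in sum()/prod(); the .s branch is dead under Pre_ (TypeError excluded there)
def tokVal : Tok → Int
  | .i n => n
  | .s _ => 0

def solve_problems (problems : List (Tok × List Tok)) : Int :=
  problems.foldl (fun total p =>
    if p.1 = Tok.s "+" then total + (p.2.map tokVal).sum
    else if p.1 = Tok.s "*" then total + (p.2.map tokVal).prod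
    else total) 0

-- pyGetD defaults are dead under Pre_ (empty input / ragged rows raise IndexError and are excluded)
def part_1 (parsed_input : String) : Int :=
  let rows := (PySem.Str.splitlines parsed_input).map
      (fun line => (PySem.Str.split₀ line).map parseTok)
  let length := (PySem.List.pyGetD rows 0 []).length
  let problems := (PySem.List.pyRange 0 (length : Int) 1).map (fun x =>
      (PySem.List.pyRange 0 (rows.length : Int) 1).map (fun y =>
        PySem.List.pyGetD (PySem.List.pyGetD rows y []) x (Tok.i 0)))
  let problems2 := problems.map (fun p =>
      (PySem.List.pyGetD p (-1) (Tok.i 0), PySem.List.slice p none (some (-1))))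
  solve_problems problems2

-- ===== PORT B =====

-- '0 if op == "+" else 1 if op == "*" else None'
def initAcc (op : Tok) : Option Int :=
  if op = Tok.s "+" then some 0 else if op = Tok.s "*" then some 1 else none

-- one comprehension step of B's loop: update every column accumulator from one row
def stepB (ops : List Tok) (acc : List (Option Int)) (row : List Tok) : List (Option Int) :=
  (PySem.List.enumerate acc).map (fun xa =>
    match xa.2 with
    | none => none
    | some a =>
      if PySem.List.pyGetD ops xa.1 (Tok.i 0) = Tok.s "+"
      then some (a + tokVal (PySem.List.pyGetD row xa.1 (Tok.i 0)))
      else some (a * tokVal (PySem.List.pyGetD row xa.1 (Tok.i 0))))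

-- pyGetD defaults dead under Pre_ exactly as in part_1
def part_1_alt (parsed_input : String) : Int :=
  let rows := (PySem.Str.splitlines parsed_input).map
      (fun line => (PySem.Str.split₀ line).map parseTok)
  let ops := PySem.List.pyGetD rows (-1) []
  let acc0 := (PySem.List.slice ops none
      (some ((PySem.List.pyGetD rows 0 []).length : Int))).map initAcc
  let accF := (PySem.List.slice rows none (some (-1))).foldl (stepB ops) acc0
  (accF.filterMap id).sum

-- ===== PRECONDITION & SPEC =====
-- Pre_ = exactly the inputs where the Python A returns: at least one line (else IndexError),
-- every whitespace token an operator substring of "+*" or int()-parsable (else ValueError),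
-- every row at least as long as the first (else IndexError), and no kept operator string among
-- the number cells of a '+'/'*' column (else TypeError in sum()/prod()).
def Pre_part_1 (parsed_input : String) : Prop :=
  let rows := (PySem.Str.splitlines parsed_input).map PySem.Str.split₀
  rows ≠ [] ∧
  (∀ r ∈ rows, ∀ t ∈ r, PySem.Str.isIn t "+*" = true ∨ (PySem.Int.ofStr? t).isSome = true) ∧
  (∀ r ∈ rows, (rows.headD []).length ≤ r.length) ∧
  (∀ x < (rows.headD []).length,
     ((rows.getLastD []).getD x "" = "+" ∨ (rows.getLastD []).getD x "" = "*") →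
     ∀ r ∈ rows.dropLast, PySem.Str.isIn (r.getD x "") "+*" = false)
instance (parsed_input : String) : Decidable (Pre_part_1 parsed_input) := by
  unfold Pre_part_1; infer_instance

def pvWitness_part_1 : String := "1 2 3\n4 5 6\n+ * +"

def Spec_part_1 (parsed_input : String) (out : Int) : Prop := out = part_1_alt parsed_input
instance (parsed_input : String) (out : Int) : Decidable (Spec_part_1 parsed_input out) := by
  unfold Spec_part_1; infer_instance

-- ===== CLAIM (what is proved, stated in full; the proofs are below) =====
def Claim_equal_part_1 : Prop := ∀ (parsed_input : String), Dom_part_1 parsed_input → Pre_part_1 parsed_input → Spec_part_1 parsed_input (part_1 parsed_input)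

-- ===== LEMMAS AND PROOFS =====

-- the per-column update B's comprehension applies at column j
def updB (ops row : List Tok) (j : Int) : Option Int → Option Int
  | none => none
  | some a =>
      if PySem.List.pyGetD ops j (Tok.i 0) = Tok.s "+"
      then some (a + tokVal (PySem.List.pyGetD row j (Tok.i 0)))
      else some (a * tokVal (PySem.List.pyGetD row j (Tok.i 0)))

theorem take_eq_map_pyRange {α : Type} (xs : List α) (d : α) (n : Nat) (h : n ≤ xs.length) :
    (PySem.List.pyRange 0 (n : Int) 1).map (fun j => PySem.List.pyGetD xs j d) = xs.take n := by
  rw [PySem.List.pyRange_zero_natCast, List.map_map]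
  simp only [Function.comp_def, PySem.List.pyGetD_natCast]
  apply List.ext_getElem
  · simp [h]
  · intro i h1 h2
    have : i < n := by simpa using h1
    simp [List.getD, List.getElem?_eq_getElem (by omega : i < xs.length)]

theorem stepB_map (ops row : List Tok) (n : Nat) (F : Int → Option Int) :
    stepB ops ((PySem.List.pyRange 0 (n : Int) 1).map F) row
      = (PySem.List.pyRange 0 (n : Int) 1).map (fun j => updB ops row j (F j)) := by
  unfold stepB
  rw [PySem.List.enumerate_eq_map_pyRange _ (none : Option Int)]
  have hl : PySem.List.len ((PySem.List.pyRange 0 (n : Int) 1).map F) = (n : Int) := by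
    simp [pysem]
  rw [hl, List.map_map]
  apply List.map_congr_left
  intro j hj
  obtain ⟨h0, hn⟩ := PySem.List.mem_pyRange_one.mp hj
  simp only [Function.comp_def, PySem.List.pyGetD_map_pyRange_of_nonneg F _ _ _ h0 hn]
  cases F j <;> simp [updB]

theorem foldl_stepB_map (ops : List Tok) (rl : List (List Tok)) (n : Nat) (F : Int → Option Int) :
    rl.foldl (stepB ops) ((PySem.List.pyRange 0 (n : Int) 1).map F)
      = (PySem.List.pyRange 0 (n : Int) 1).map (fun j => rl.foldl (fun o row => updB ops row j o) (F j)) := by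
  induction rl generalizing F with
  | nil => simp
  | cons row rl ih => rw [List.foldl_cons, stepB_map, ih]; simp [List.foldl_cons]

theorem col_none (ops : List Tok) (rl : List (List Tok)) (j : Int) :
    rl.foldl (fun o row => updB ops row j o) none = none := by
  induction rl with
  | nil => rfl
  | cons row rl ih => simpa [updB] using ih

theorem col_plus (ops : List Tok) (rl : List (List Tok)) (j : Int)
    (h : PySem.List.pyGetD ops j (Tok.i 0) = Tok.s "+") (a : Int) :
    rl.foldl (fun o row => updB ops row j o) (some a)
      = some (a + (rl.map (fun row => tokVal (PySem.List.pyGetD row j (Tok.i 0)))).sum) := by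
  induction rl generalizing a with
  | nil => simp
  | cons row rl ih =>
      rw [List.foldl_cons]
      have hu : updB ops row j (some a) = some (a + tokVal (PySem.List.pyGetD row j (Tok.i 0))) := by
        simp [updB, h]
      rw [hu, ih]
      simp [add_assoc]

theorem col_times (ops : List Tok) (rl : List (List Tok)) (j : Int)
    (h : PySem.List.pyGetD ops j (Tok.i 0) ≠ Tok.s "+") (a : Int) :
    rl.foldl (fun o row => updB ops row j o) (some a)
      = some (a * (rl.map (fun row => tokVal (PySem.List.pyGetD row j (Tok.i 0)))).prod) := by
  induction rl generalizing a with
  | nil => simp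
  | cons row rl ih =>
      rw [List.foldl_cons]
      have hu : updB ops row j (some a) = some (a * tokVal (PySem.List.pyGetD row j (Tok.i 0))) := by
        simp [updB, h]
      rw [hu, ih]
      simp [mul_assoc]

theorem sum_filterMap_map {α : Type} (l : List α) (h : α → Option Int) :
    (((l.map h).filterMap id).sum) = (l.map (fun x => (h x).getD 0)).sum := by
  rw [List.filterMap_map]
  simp only [Function.comp_def, id_eq]
  induction l with
  | nil => rfl
  | cons x l ih => cases hx : h x <;> simp [hx, ih]

theorem solve_eq_sum (ps : List (Tok × List Tok)) :
    solve_problems ps = (ps.map (fun p =>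
      if p.1 = Tok.s "+" then (p.2.map tokVal).sum
      else if p.1 = Tok.s "*" then (p.2.map tokVal).prod
      else 0)).sum := by
  unfold solve_problems
  rw [PySem.List.foldl_congr_mem _ _ (fun total p => total +
      (if p.1 = Tok.s "+" then (p.2.map tokVal).sum
       else if p.1 = Tok.s "*" then (p.2.map tokVal).prod
       else 0)) 0 (by intro acc x hx; by_cases h1 : x.1 = Tok.s "+" <;> by_cases h2 : x.1 = Tok.s "*" <;> simp [h1, h2])]
  rw [PySem.List.foldl_add]; simp

-- A's column x, as a map over the rows
theorem col_eq (L : List (List Tok)) (x : Int) :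
    (PySem.List.pyRange 0 (L.length : Int) 1).map
        (fun y => PySem.List.pyGetD (PySem.List.pyGetD L y []) x (Tok.i 0))
      = L.map (fun r => PySem.List.pyGetD r x (Tok.i 0)) := by
  conv_rhs => rw [← PySem.List.map_pyGetD_pyRange_zero' L []]
  rw [List.map_map]
  rfl

theorem getLast_map' {α β : Type} (f : α → β) (L : List α) (h : L ≠ [])
    (h2 : L.map f ≠ []) : (L.map f).getLast h2 = f (L.getLast h) := by
  exact List.getLast_map h2

-- the heart of the equivalence, stated over the parsed grid
theorem main_eq (L : List (List Tok)) (hne : L ≠ [])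
    (hops : (PySem.List.pyGetD L 0 []).length ≤ (PySem.List.pyGetD L (-1) []).length) :
    solve_problems
      (((PySem.List.pyRange 0 ((PySem.List.pyGetD L 0 []).length : Int) 1).map (fun x =>
          (PySem.List.pyRange 0 (L.length : Int) 1).map (fun y =>
            PySem.List.pyGetD (PySem.List.pyGetD L y []) x (Tok.i 0)))).map (fun p =>
          (PySem.List.pyGetD p (-1) (Tok.i 0), PySem.List.slice p none (some (-1)))))
    = (((PySem.List.slice L none (some (-1))).foldl (stepB (PySem.List.pyGetD L (-1) []))
          ((PySem.List.slice (PySem.List.pyGetD L (-1) []) none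
            (some ((PySem.List.pyGetD L 0 []).length : Int))).map initAcc)).filterMap id).sum := by
  have hopsL : PySem.List.pyGetD L (-1) [] = L.getLast hne := PySem.List.pyGetD_neg_one L [] hne
  rw [hopsL] at hops ⊢
  rw [solve_eq_sum, List.map_map]
  rw [PySem.List.slice_to_neg_one, PySem.List.slice_to_natCast,
      ← take_eq_map_pyRange (L.getLast hne) (Tok.i 0) _ hops, List.map_map,
      List.map_map, foldl_stepB_map, sum_filterMap_map]
  apply congrArg List.sum
  apply List.map_congr_left
  intro j hj
  simp only [Function.comp_def]
  rw [col_eq L j]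
  have hpne : L.map (fun r => PySem.List.pyGetD r j (Tok.i 0)) ≠ [] := by
    simpa using hne
  rw [PySem.List.pyGetD_neg_one _ _ hpne, List.getLast_map,
      PySem.List.slice_to_neg_one, ← List.map_dropLast]
  by_cases h1 : PySem.List.pyGetD (L.getLast hne) j (Tok.i 0) = Tok.s "+"
  · simp [h1, initAcc, col_plus (L.getLast hne) L.dropLast j h1, List.map_map, Function.comp_def]
  · by_cases h2 : PySem.List.pyGetD (L.getLast hne) j (Tok.i 0) = Tok.s "*"
    · simp [h2, initAcc, col_times (L.getLast hne) L.dropLast j h1, List.map_map, Function.comp_def]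
    · have hia : initAcc (PySem.List.pyGetD (L.getLast hne) j (Tok.i 0)) = none := by
        simp [initAcc, h1, h2]
      simp [h1, h2, hia, col_none]

theorem hops_of (R : List (List String)) (hne : R ≠ [])
    (hlen : ∀ r ∈ R, (R.headD []).length ≤ r.length) :
    (PySem.List.pyGetD (R.map (List.map parseTok)) 0 []).length
      ≤ (PySem.List.pyGetD (R.map (List.map parseTok)) (-1) []).length := by
  obtain ⟨r, R', rfl⟩ := List.exists_cons_of_ne_nil hne
  have hmapne : (r :: R').map (List.map parseTok) ≠ [] := by simp
  have h1 : PySem.List.pyGetD ((r :: R').map (List.map parseTok)) 0 [] = r.map parseTok := by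
    simp [PySem.List.pyGetD_zero]
  have h2 : PySem.List.pyGetD ((r :: R').map (List.map parseTok)) (-1) []
      = List.map parseTok ((r :: R').getLast (by simp)) := by
    rw [PySem.List.pyGetD_neg_one _ _ hmapne]
    exact getLast_map' (List.map parseTok) (r :: R') (by simp) hmapne
  rw [h1, h2]
  simp only [List.length_map]
  have := hlen _ (List.getLast_mem (by simp : (r :: R') ≠ []))
  simpa using this

-- ===== VERDICT (by name: the statement is the Claim_ definition above) =====
theorem part_1_spec : Claim_equal_part_1 := by
  intro s _ hpre
  unfold Pre_part_1 at hpre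
  obtain ⟨hne, -, hlen, -⟩ := hpre
  simp only [Spec_part_1, part_1, part_1_alt]
  have hmm : (List.map (fun line => List.map parseTok (PySem.Str.split₀ line)) (PySem.Str.splitlines s))
      = ((PySem.Str.splitlines s).map PySem.Str.split₀).map (List.map parseTok) := by
    rw [List.map_map]; rfl
  refine main_eq _ ?_ ?_
  · rw [hmm]
    simp only [ne_eq, List.map_eq_nil_iff]
    simpa using hne
  · rw [hmm]
    exact hops_of _ hne hlen
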